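-- pv_equiv track=rewrite | github.com/lumi-mansikkamaa/explore-us-births | basics.py | month_births
-- ===== SOURCE A (Python) =====
-- def month_births(list):
--     births_per_month = {}
--     for item in list:
--         month = item[1]
--         births = item[4]
--         if month in births_per_month:
--             births_per_month[month] += births
--         else:
--             births_per_month[month] = births
--     return births_per_month
-- ===== SOURCE B (Python) =====
-- def month_births(list):
--     # pass 1: distinct months in first-occurrence order; pass 2: per-month sums
--     months = dict.fromkeys(item[1] for item in list)
--     return {m: sum(item[4] for item in list if item[1] == m) for m in months}
-- ===== Notes on version B (the rewrite author's own statement) =====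
-- stated objective: alternative
-- what changed: Replaced the single-pass dict accumulation with a two-pass scheme: first collect the distinct months in first-occurrence order (dict.fromkeys), then build the result with a per-month sum comprehension over the whole list.
import Mathlib
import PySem

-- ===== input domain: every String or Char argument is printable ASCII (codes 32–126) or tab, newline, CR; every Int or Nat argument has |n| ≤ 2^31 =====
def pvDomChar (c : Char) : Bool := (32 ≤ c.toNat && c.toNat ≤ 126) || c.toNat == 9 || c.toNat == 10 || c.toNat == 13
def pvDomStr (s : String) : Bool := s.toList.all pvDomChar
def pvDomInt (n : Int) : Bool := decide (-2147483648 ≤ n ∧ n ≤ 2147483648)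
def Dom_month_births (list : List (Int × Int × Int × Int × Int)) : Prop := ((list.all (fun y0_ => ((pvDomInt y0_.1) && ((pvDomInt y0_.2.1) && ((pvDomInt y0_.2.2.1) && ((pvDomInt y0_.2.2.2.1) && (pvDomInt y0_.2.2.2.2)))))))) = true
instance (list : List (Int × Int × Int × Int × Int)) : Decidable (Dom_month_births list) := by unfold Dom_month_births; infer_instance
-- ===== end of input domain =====

-- B replaces A's one-pass dict accumulation by a two-pass dedup-then-sum comprehension (alternative decomposition, same result).

-- ===== PORT A =====
-- one pass: accumulate births into an insertion-ordered dict
def month_births (list : List (Int × Int × Int × Int × Int)) : List (Int × Int) :=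
  (list.foldl (fun d item =>
      let month := item.2.1
      let births := item.2.2.2.2
      if d.contains month then d.insert month (d.getD month 0 + births)
      else d.insert month births) PySem.Dict.empty).items

-- ===== PORT B =====
-- pass 1: distinct months in first-occurrence order (dict.fromkeys = PySem.List.dedup);
-- pass 2: for each month, sum item[4] over the whole list
def month_births_alt (list : List (Int × Int × Int × Int × Int)) : List (Int × Int) :=
  (PySem.List.dedup (list.map (fun item => item.2.1))).map
    (fun m => (m, ((list.filter (fun item => item.2.1 == m)).map (fun item => item.2.2.2.2)).sum))

-- ===== PRECONDITION & SPEC =====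
def Spec_month_births (list : List (Int × Int × Int × Int × Int)) (out : List (Int × Int)) : Prop := out = month_births_alt list
instance (list : List (Int × Int × Int × Int × Int)) (out : List (Int × Int)) : Decidable (Spec_month_births list out) := by unfold Spec_month_births; infer_instance

-- ===== CLAIM (what is proved, stated in full; the proofs are below) =====
def Claim_equal_month_births : Prop := ∀ (list : List (Int × Int × Int × Int × Int)), Dom_month_births list → Spec_month_births list (month_births list)

-- ===== LEMMAS AND PROOFS =====

def mbSum (l : List (Int × Int × Int × Int × Int)) (m : Int) : Int :=
  ((l.filter (fun item => item.2.1 == m)).map (fun item => item.2.2.2.2)).sum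

theorem mbSum_append (l : List (Int × Int × Int × Int × Int)) (x : Int × Int × Int × Int × Int) (m : Int) :
    mbSum (l ++ [x]) m = mbSum l m + (if x.2.1 == m then x.2.2.2.2 else 0) := by
  simp [mbSum, List.filter_append, List.filter]
  split <;> simp_all

theorem mbSum_of_not_mem (l : List (Int × Int × Int × Int × Int)) (m : Int)
    (h : m ∉ l.map (fun item => item.2.1)) : mbSum l m = 0 := by
  have : l.filter (fun item => item.2.1 == m) = [] := by
    rw [List.filter_eq_nil_iff]
    intro a ha hc
    exact h (List.mem_map.2 ⟨a, ha, by simpa using hc⟩)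
  simp [mbSum, this]

theorem mb_inv (l : List (Int × Int × Int × Int × Int)) :
    (l.foldl (fun d item =>
      let month := item.2.1
      let births := item.2.2.2.2
      if d.contains month then d.insert month (d.getD month 0 + births)
      else d.insert month births) PySem.Dict.empty).items
    = (PySem.List.dedup (l.map (fun item => item.2.1))).map (fun m => (m, mbSum l m)) := by
  induction l using List.reverseRecOn with
  | nil => rfl
  | append_singleton l x ih =>
    rw [List.foldl_append, List.foldl_cons, List.foldl_nil]
    set d := l.foldl (fun d item =>
      let month := item.2.1
      let births := item.2.2.2.2
      if d.contains month then d.insert month (d.getD month 0 + births)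
      else d.insert month births) PySem.Dict.empty with hd
    obtain ⟨x1, m, x3, x4, b⟩ := x
    have hkeys : d.keys = PySem.List.dedup (l.map fun it => it.2.1) := by
      show d.items.map Prod.fst = _
      rw [ih, List.map_map]
      exact List.map_id _
    have hnd : d.keys.Nodup := by
      rw [hkeys]; exact PySem.Set.nodup_ofList _
    have hmapapp : (l ++ [(x1, m, x3, x4, b)]).map (fun it => it.2.1) = l.map (fun it => it.2.1) ++ [m] := by
      simp
    by_cases hmem : m ∈ l.map (fun it => it.2.1)
    · -- month already present
      have hc : d.contains m = true :=
        (PySem.Dict.contains_iff_mem_keys d m).2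
          (by rw [hkeys]; exact (PySem.Set.mem_ofList _ _).2 hmem)
      have hmemd : m ∈ PySem.List.dedup (l.map fun it => it.2.1) :=
        (PySem.Set.mem_ofList _ _).2 hmem
      have hdedup : PySem.List.dedup ((l ++ [(x1, m, x3, x4, b)]).map fun it => it.2.1)
          = PySem.List.dedup (l.map fun it => it.2.1) := by
        rw [hmapapp]
        show PySem.Set.ofList _ = _
        rw [PySem.Set.ofList, List.foldl_append, List.foldl_cons, List.foldl_nil]
        rw [← PySem.Set.ofList, PySem.Set.add]
        have hcm : PySem.Set.contains (PySem.Set.ofList (l.map fun it => it.2.1)) m = true := by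
          simpa [PySem.Set.contains] using hmemd
        rw [if_pos hcm]
        rfl
      have hv : d.getD m 0 = mbSum l m := by
        apply PySem.Dict.getD_of_mem_items _ _ hnd
        rw [ih]
        exact List.mem_map.2 ⟨m, hmemd, rfl⟩
      simp only [if_pos hc]
      rw [PySem.Dict.items_insert_of_contains _ _ hc, ih, hdedup, List.map_map]
      apply List.map_congr_left
      intro a ha
      simp only [Function.comp]
      by_cases hae : a = m
      · subst hae
        simp [hv, mbSum_append]
      · have : (a == m) = false := by simpa using hae
        simp [this, mbSum_append, Ne.symm hae]
    · -- new month
      have hc : d.contains m = false := by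
        by_contra h
        have := (PySem.Dict.contains_iff_mem_keys d m).1 (by simpa using h)
        rw [hkeys] at this
        exact hmem ((PySem.Set.mem_ofList _ _).1 this)
      have hdedup : PySem.List.dedup ((l ++ [(x1, m, x3, x4, b)]).map fun it => it.2.1)
          = PySem.List.dedup (l.map fun it => it.2.1) ++ [m] := by
        rw [hmapapp]
        show PySem.Set.ofList _ = _
        rw [PySem.Set.ofList, List.foldl_append, List.foldl_cons, List.foldl_nil]
        rw [← PySem.Set.ofList, PySem.Set.add]
        have hcm : PySem.Set.contains (PySem.Set.ofList (l.map fun it => it.2.1)) m = false := by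
          simp only [PySem.Set.contains, List.contains_eq_mem, decide_eq_false_iff_not]
          intro h
          exact hmem ((PySem.Set.mem_ofList _ _).1 h)
        rw [if_neg (by simp only [hcm]; exact Bool.false_ne_true)]
        rfl
      simp only [if_neg (by simp only [hc]; exact Bool.false_ne_true : ¬ d.contains m = true)]
      rw [PySem.Dict.items_insert_of_not_contains _ _ hc, ih, hdedup, List.map_append]
      congr 1
      · apply List.map_congr_left
        intro a ha
        have haml : a ∈ l.map (fun it => it.2.1) := (PySem.Set.mem_ofList _ _).1 ha
        have hane : a ≠ m := fun h => hmem (h ▸ haml)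
        have : (m == a) = false := by simpa using Ne.symm hane
        simp [mbSum_append, this]
      · simp [mbSum_append, mbSum_of_not_mem l m hmem]

-- ===== VERDICT (by name: the statement is the Claim_ definition above) =====
theorem month_births_spec : Claim_equal_month_births := by
  intro l _
  show _ = _
  rw [month_births, month_births_alt, mb_inv]
  rfl
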